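-- pv_equiv track=rewrite | github.com/Gabbo0709/wordle-python | python/wordle_python/api/palabras.py | validar_palabra
-- ===== SOURCE A (Python) =====
-- def validar_palabra(entrada: str, palabra: str) -> tuple:
--     """
--     Valida la palabra ingresada por el usuario
--     :param entrada: Palabra ingresada por el usuario
--     :param palabra: Palabra a adivinar
--     :return: Tupla con las posiciones correctas, incorrectas y no encontradas de la palabra ingresada
--     """
--     # Inicializa el resultado con -1 para cada posición
--     resultado = [-1] * len(entrada)
--
--     # Cuenta las apariciones de cada letra en la palabra a adivinar
--     apariciones_palabra_dia = {letra: palabra.count(letra) for letra in set(palabra)}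
--     # Inicializa un diccionario para llevar el conteo de letras analizadas en la entrada
--     analizado_entrada = {letra: 0 for letra in set(entrada)}
--
--     # Marcar letras correctas
--     for i, letra in enumerate(entrada):
--         if letra == palabra[i]:
--             resultado[i] = 1
--             analizado_entrada[letra] += 1
--
--     # Marcar letras incorrectas o en posiciones incorrectas
--     for i, letra in enumerate(entrada):
--         if resultado[i] == -1:
--             if letra in apariciones_palabra_dia and analizado_entrada[letra] < apariciones_palabra_dia[letra]:
--                 resultado[i] = 0
--                 analizado_entrada[letra] += 1
--
--     return tuple(resultado)
--
--
--
--
--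
--     return resultado
-- ===== SOURCE B (Python) =====
-- def validar_palabra(entrada: str, palabra: str) -> tuple:
--     # Stateless closed form: each position's colour is computed directly from
--     # counts, with no mutable result list and no dictionaries.
--     n = len(entrada)
--
--     def color(i):
--         c = entrada[i]
--         if c == palabra[i]:
--             return 1
--         greens = sum(1 for j in range(n) if entrada[j] == c and entrada[j] == palabra[j])
--         before = sum(1 for j in range(i) if entrada[j] == c and entrada[j] != palabra[j])
--         return 0 if before + greens < palabra.count(c) else -1
--
--     return tuple(color(i) for i in range(n))
-- ===== Notes on version B (the rewrite author's own statement) =====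
-- stated objective: alternative
-- what changed: Replaces A's two stateful left-to-right passes over a mutable result list with counting dictionaries by a stateless closed form: each position's colour is computed independently from the target count of its letter, the number of green positions of that letter, and the number of earlier non-green occurrences of it (trading A's linear passes for quadratic recounting).
import Mathlib
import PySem

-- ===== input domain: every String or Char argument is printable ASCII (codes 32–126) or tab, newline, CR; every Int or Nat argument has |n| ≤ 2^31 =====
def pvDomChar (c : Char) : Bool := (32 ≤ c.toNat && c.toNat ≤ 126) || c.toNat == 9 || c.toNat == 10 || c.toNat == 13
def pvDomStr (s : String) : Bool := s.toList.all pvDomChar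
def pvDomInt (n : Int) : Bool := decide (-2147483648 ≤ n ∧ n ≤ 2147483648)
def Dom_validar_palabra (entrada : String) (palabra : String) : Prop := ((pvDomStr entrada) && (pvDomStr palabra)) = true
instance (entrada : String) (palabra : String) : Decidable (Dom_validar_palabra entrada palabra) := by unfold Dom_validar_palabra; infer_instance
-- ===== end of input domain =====

-- B recomputes each position's colour by a stateless closed form (counts only), instead of A's
-- two stateful passes with a mutable result list and counting dictionaries; same values, not faster.

-- ===== PORT A =====
def validar_palabra (entrada : String) (palabra : String) : List Int :=
  let es := entrada.toList
  let ps := palabra.toList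
  -- resultado = [-1] * len(entrada)
  let resultado : List Int := List.replicate es.length (-1)
  -- {letra: palabra.count(letra) for letra in set(palabra)}  (str.count of a 1-char needle = char count)
  let apariciones : PySem.Dict Char Int :=
    (PySem.Set.ofList ps).foldl
      (fun d letra => d.insert letra ((PySem.List.count ps letra : Nat) : Int)) PySem.Dict.empty
  -- {letra: 0 for letra in set(entrada)}
  let analizado : PySem.Dict Char Int :=
    (PySem.Set.ofList es).foldl (fun d letra => d.insert letra 0) PySem.Dict.empty
  -- first loop: mark greens (palabra[i] raises when i ≥ len(palabra): excluded by Pre_)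
  let st1 :=
    (PySem.List.enumerate es).foldl
      (fun (st : List Int × PySem.Dict Char Int) p =>
        if PySem.List.pyGet? ps p.1 = some p.2 then
          (PySem.List.pySetD st.1 p.1 1, st.2.modify p.2 0 (· + 1))
        else st)
      (resultado, analizado)
  -- second loop: mark yellows (analizado[letra] always present: letra ∈ entrada; getD is exact here)
  let st2 :=
    (PySem.List.enumerate es).foldl
      (fun (st : List Int × PySem.Dict Char Int) p =>
        if PySem.List.pyGetD st.1 p.1 0 = -1 then
          if apariciones.contains p.2 && decide (st.2.getD p.2 0 < apariciones.getD p.2 0) then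
            (PySem.List.pySetD st.1 p.1 0, st.2.modify p.2 0 (· + 1))
          else st
        else st)
      st1
  st2.1

-- ===== PORT B =====
def validar_palabra_alt (entrada : String) (palabra : String) : List Int :=
  let es := entrada.toList
  let ps := palabra.toList
  let n := es.length
  (List.range n).map (fun (i : Nat) =>
    let c := PySem.List.pyGetD es (i : Int) ' '
    if PySem.List.pyGet? ps (i : Int) = some c then (1 : Int)
    else
      let greens := (List.range n).countP (fun (j : Nat) =>
        decide (PySem.List.pyGetD es (j : Int) ' ' = c ∧
                PySem.List.pyGet? ps (j : Int) = some (PySem.List.pyGetD es (j : Int) ' ')))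
      let before := (List.range i).countP (fun (j : Nat) =>
        decide (PySem.List.pyGetD es (j : Int) ' ' = c ∧
                PySem.List.pyGet? ps (j : Int) ≠ some (PySem.List.pyGetD es (j : Int) ' ')))
      if before + greens < PySem.List.count ps c then 0 else -1)

-- ===== PRECONDITION & SPEC =====
-- A (and B) index palabra[i] for every i < len(entrada): both raise IndexError when entrada is longer.
def Pre_validar_palabra (entrada : String) (palabra : String) : Prop :=
  entrada.toList.length ≤ palabra.toList.length
instance (entrada : String) (palabra : String) : Decidable (Pre_validar_palabra entrada palabra) := by
  unfold Pre_validar_palabra; infer_instance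

def pvWitness_validar_palabra : String × String := ("abca", "acab")

def Spec_validar_palabra (entrada : String) (palabra : String) (out : List Int) : Prop := out = validar_palabra_alt entrada palabra
instance (entrada : String) (palabra : String) (out : List Int) : Decidable (Spec_validar_palabra entrada palabra out) := by unfold Spec_validar_palabra; infer_instance

-- ===== CLAIM (what is proved, stated in full; the proofs are below) =====
def Claim_equal_validar_palabra : Prop := ∀ (entrada : String) (palabra : String), Dom_validar_palabra entrada palabra → Pre_validar_palabra entrada palabra → Spec_validar_palabra entrada palabra (validar_palabra entrada palabra)

-- ===== LEMMAS AND PROOFS =====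

-- proof-only vocabulary: green test, target count, green count of a letter, earlier non-green
-- occurrences, and yellows taken so far
def isG (es ps : List Char) (j : Nat) : Bool := decide (ps[j]? = some (es.getD j ' '))
def cntT (ps : List Char) (c : Char) : Nat := ps.count c
def grnC (es ps : List Char) (c : Char) : Nat :=
  (List.range es.length).countP (fun j => es.getD j ' ' == c && isG es ps j)
def bfr (es ps : List Char) (c : Char) (k : Nat) : Nat :=
  (List.range k).countP (fun j => es.getD j ' ' == c && !isG es ps j)
def yel (es ps : List Char) (c : Char) (k : Nat) : Nat :=
  (List.range k).countP (fun j => es.getD j ' ' == c && !isG es ps j &&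
    decide (grnC es ps c + bfr es ps c j < cntT ps c))

-- L1: getD of an insert-fold with state-independent values
theorem getD_foldl_insert_fun (L : List Char) (v : Char → Int) (d : PySem.Dict Char Int) (c : Char) :
    (L.foldl (fun d k => d.insert k (v k)) d).getD c 0 = if c ∈ L then v c else d.getD c 0 := by
  induction L generalizing d with
  | nil => simp
  | cons a t ih =>
    simp only [List.foldl_cons, ih, List.mem_cons, PySem.Dict.getD_insert]
    by_cases hct : c ∈ t
    · simp [hct]
    · by_cases hca : c = a <;> simp [hca, hct]

-- L2: contains of apariciones
theorem contains_apar (ps : List Char) (c : Char) :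
    ((PySem.Set.ofList ps).foldl
      (fun d letra => d.insert letra ((PySem.List.count ps letra : Nat) : Int)) PySem.Dict.empty).contains c
    = true ↔ c ∈ ps := by
  rw [PySem.Dict.contains_iff_mem_keys, PySem.Dict.keys_foldl_insert]
  simp [PySem.Dict.keys_empty, PySem.Set.update, ← PySem.Set.ofList_eq_foldl, PySem.Set.mem_ofList]

-- L3: getD of apariciones
theorem getD_apar (ps : List Char) (c : Char) :
    ((PySem.Set.ofList ps).foldl
      (fun d letra => d.insert letra ((PySem.List.count ps letra : Nat) : Int)) PySem.Dict.empty).getD c 0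
    = if c ∈ ps then ((cntT ps c : Nat) : Int) else 0 := by
  rw [getD_foldl_insert_fun]
  simp [PySem.Set.mem_ofList, PySem.List.count_eq, cntT]

-- L4: set on a map-range list
theorem set_map_range (n k : Nat) (hk : k < n) (f : Nat → Int) (v : Int) :
    ((List.range n).map f).set k v = (List.range n).map (fun j => if j = k then v else f j) := by
  apply List.ext_getElem
  · simp
  · intro i h1 h2
    simp only [List.getElem_set, List.getElem_map, List.getElem_range]
    simp at h1
    by_cases hik : k = i <;> simp [hik]
    · omega

-- L6: loop1 result list
theorem loop1_res (es ps : List Char) :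
    (List.range es.length).foldl
      (fun res j => if ps[j]? = some (es.getD j ' ') then res.set j 1 else res)
      (List.replicate es.length (-1))
    = (List.range es.length).map (fun j => if isG es ps j then (1 : Int) else -1) := by
  have aux : ∀ k, k ≤ es.length →
      (List.range k).foldl
        (fun res j => if ps[j]? = some (es.getD j ' ') then res.set j 1 else res)
        (List.replicate es.length (-1))
      = (List.range es.length).map (fun j => if j < k ∧ isG es ps j then (1 : Int) else -1) := by
    intro k hk
    induction k with
    | zero => simp [List.map_const']
    | succ m ih =>
      rw [List.range_succ, List.foldl_append, ih (by omega)]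
      simp only [List.foldl_cons, List.foldl_nil]
      have hiff : ∀ j, j ≠ m → ((j < m + 1 ∧ isG es ps j = true) ↔ (j < m ∧ isG es ps j = true)) := by
        intro j hjm
        constructor <;> rintro ⟨h1, h2⟩ <;> exact ⟨by omega, h2⟩
      by_cases hg : ps[m]? = some (es.getD m ' ')
      · have hG : isG es ps m = true := by simp only [isG]; exact decide_eq_true hg
        rw [if_pos hg, set_map_range _ _ (by omega)]
        apply List.map_congr_left
        intro j hj
        by_cases hjm : j = m
        · subst hjm
          simp [hG]
        · rw [if_neg hjm, if_congr (hiff j hjm) rfl rfl]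
      · have hG : isG es ps m = false := by simp only [isG]; exact decide_eq_false hg
        rw [if_neg hg]
        apply List.map_congr_left
        intro j hj
        by_cases hjm : j = m
        · subst hjm
          simp [hG]
        · rw [if_congr (hiff j hjm) rfl rfl]
  rw [aux es.length le_rfl]
  apply List.map_congr_left
  intro j hj
  simp only [List.mem_range] at hj
  simp [hj]

-- L7: loop1 dict of analysed letters
theorem loop1_ana (es ps : List Char) (c : Char) :
    ((List.range es.length).foldl
      (fun d j => if ps[j]? = some (es.getD j ' ') then d.modify (es.getD j ' ') 0 (· + 1) else d)
      ((PySem.Set.ofList es).foldl (fun d letra => d.insert letra 0) PySem.Dict.empty)).getD c 0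
    = ((grnC es ps c : Nat) : Int) := by
  rw [PySem.List.foldl_ite_eq_foldl_filter (p := fun j => ps[j]? = some (es.getD j ' '))]
  rw [show (fun (d : PySem.Dict Char Int) (j : Nat) => d.modify (es.getD j ' ') 0 (· + 1))
      = (fun (d : PySem.Dict Char Int) (j : Nat) => d.modify ((fun j => es.getD j ' ') j) 0 (· + 1)) from rfl]
  rw [← List.foldl_map (f := fun j => es.getD j ' ') (g := fun (d : PySem.Dict Char Int) (x : Char) => d.modify x 0 (· + 1))]
  rw [PySem.Dict.getD_foldl_modify_add_one]
  rw [getD_foldl_insert_fun]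
  have h0 : (if c ∈ PySem.Set.ofList es then (0 : Int) else PySem.Dict.empty.getD c 0) = 0 := by
    split <;> simp [PySem.Dict.getD_empty]
  rw [h0, zero_add]
  rw [List.count_eq_countP, List.countP_map, List.countP_filter]
  unfold grnC
  rw [Nat.cast_inj]
  rfl

-- L8: greedy allowance — the yellows taken so far saturate at the budget
theorem yel_eq_min (es ps : List Char) (c : Char) (k : Nat) :
    yel es ps c k = min (bfr es ps c k) (cntT ps c - grnC es ps c) := by
  induction k with
  | zero => simp [yel, bfr]
  | succ m ih =>
    have hbs : bfr es ps c (m + 1)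
        = bfr es ps c m + (if (es.getD m ' ' == c && !isG es ps m) = true then 1 else 0) := by
      simp [bfr, List.range_succ, List.countP_append, List.countP_cons, List.countP_nil]
    have hys : yel es ps c (m + 1)
        = yel es ps c m + (if (es.getD m ' ' == c && !isG es ps m &&
            decide (grnC es ps c + bfr es ps c m < cntT ps c)) = true then 1 else 0) := by
      simp [yel, List.range_succ, List.countP_append, List.countP_cons, List.countP_nil, bfr]
    rw [hys, hbs, ih]
    cases hG : isG es ps m with
    | true =>
      simp only [hG, Bool.not_true, Bool.and_false, Bool.false_and, Bool.false_eq_true, if_false]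
      omega
    | false =>
      by_cases hcc : es.getD m ' ' = c
      · have hb : (es.getD m ' ' == c) = true := beq_iff_eq.mpr hcc
        by_cases hlt : grnC es ps c + bfr es ps c m < cntT ps c
        · simp only [hb, hG, hlt, Bool.not_false, Bool.and_true, Bool.true_and, decide_true,
            Bool.and_self, if_true]
          omega
        · simp only [hb, hG, hlt, Bool.not_false, Bool.and_true, Bool.true_and, decide_false,
            Bool.and_false, Bool.false_eq_true, if_false, if_true]
          omega
      · have hb : (es.getD m ' ' == c) = false := beq_eq_false_iff_ne.mpr hcc
        simp only [hb, Bool.false_and, Bool.false_eq_true, if_false]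
        omega

def specF (es ps : List Char) (j : Nat) : Int :=
  if isG es ps j then 1
  else if bfr es ps (es.getD j ' ') j + grnC es ps (es.getD j ' ') < cntT ps (es.getD j ' ') then 0
  else -1

-- step identity for yel (extracted from yel_eq_min's proof)
theorem yel_succ (es ps : List Char) (c : Char) (m : Nat) :
    yel es ps c (m + 1) = yel es ps c m + (if (es.getD m ' ' == c && !isG es ps m &&
      decide (grnC es ps c + bfr es ps c m < cntT ps c)) = true then 1 else 0) := by
  simp [yel, List.range_succ, List.countP_append, List.countP_cons, List.countP_nil, bfr]

-- the per-position description is stable at an already-final position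
theorem map_bump (es ps : List Char) (m : Nat)
    (hsp : specF es ps m = if isG es ps m then 1 else -1) :
    (List.range es.length).map (fun j => if j < m then specF es ps j else if isG es ps j then (1:Int) else -1)
    = (List.range es.length).map (fun j => if j < m + 1 then specF es ps j else if isG es ps j then (1:Int) else -1) := by
  apply List.map_congr_left
  intro j _
  by_cases hjm : j = m
  · subst hjm
    simp [hsp]
  · simp only [show (j < m + 1) ↔ (j < m) from by omega]

-- writing specF m at position m advances the description
theorem map_set (es ps : List Char) (m : Nat) (hm : m < es.length) :
    ((List.range es.length).map (fun j => if j < m then specF es ps j else if isG es ps j then (1:Int) else -1)).set m (specF es ps m)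
    = (List.range es.length).map (fun j => if j < m + 1 then specF es ps j else if isG es ps j then (1:Int) else -1) := by
  rw [set_map_range _ _ hm]
  apply List.map_congr_left
  intro j _
  by_cases hjm : j = m
  · subst hjm
    simp
  · rw [if_neg hjm]
    simp only [show (j < m + 1) ↔ (j < m) from by omega]

-- the second-loop invariant
theorem loop2_inv (es ps : List Char) (apar a1 : PySem.Dict Char Int)
    (hcon : ∀ c, (apar.contains c = true ↔ c ∈ ps))
    (hget : ∀ c, c ∈ ps → apar.getD c 0 = ((cntT ps c : Nat) : Int))
    (ha1 : ∀ c, a1.getD c 0 = ((grnC es ps c : Nat) : Int)) :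
    ∀ k, k ≤ es.length →
    ∃ a : PySem.Dict Char Int,
      (List.range k).foldl
        (fun (st : List Int × PySem.Dict Char Int) (j : Nat) =>
          if st.1.getD j 0 = -1 then
            if (apar.contains (es.getD j ' ') &&
                decide (st.2.getD (es.getD j ' ') 0 < apar.getD (es.getD j ' ') 0)) = true then
              (st.1.set j 0, st.2.modify (es.getD j ' ') 0 (· + 1))
            else st
          else st)
        ((List.range es.length).map (fun j => if isG es ps j then (1 : Int) else -1), a1)
      = ((List.range es.length).map
           (fun j => if j < k then specF es ps j else if isG es ps j then (1 : Int) else -1), a)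
      ∧ ∀ c, a.getD c 0 = ((grnC es ps c + yel es ps c k : Nat) : Int) := by
  intro k hk
  induction k with
  | zero =>
    refine ⟨a1, ?_, ?_⟩
    · simp [ha1]
    · intro c
      simp [yel, ha1]
  | succ m ih =>
    obtain ⟨a, ha, hga⟩ := ih (by omega)
    have hm : m < es.length := by omega
    rw [List.range_succ, List.foldl_append, ha, List.foldl_cons, List.foldl_nil]
    have hread : ((List.range es.length).map
          (fun j => if j < m then specF es ps j else if isG es ps j then (1:Int) else -1)).getD m 0
        = (if isG es ps m then (1:Int) else -1) := by
      rw [PySem.List.getD_map_range _ _ _ _ hm]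
      simp
    cases hG : isG es ps m with
    | true =>
      have hsp : specF es ps m = if isG es ps m then 1 else -1 := by simp [specF, hG]
      refine ⟨a, ?_, ?_⟩
      · rw [hread, hG]
        rw [map_bump es ps m hsp]
        norm_num
      · intro c
        rw [hga, yel_succ]
        simp [hG]
    | false =>
      rw [hread, hG]
      simp only [Bool.false_eq_true, if_false]
      rw [if_pos trivial]
      have hyel := yel_eq_min es ps (es.getD m ' ') m
      by_cases hmem : es.getD m ' ' ∈ ps
      · by_cases hP : grnC es ps (es.getD m ' ') + bfr es ps (es.getD m ' ') m < cntT ps (es.getD m ' ')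
        · -- a yellow is assigned at m
          have hcond : (apar.contains (es.getD m ' ') &&
              decide (a.getD (es.getD m ' ') 0 < apar.getD (es.getD m ' ') 0)) = true := by
            rw [hga, hget _ hmem, (hcon _).mpr hmem]
            simp only [Bool.true_and, decide_eq_true_eq, Nat.cast_lt]
            omega
          rw [if_pos hcond]
          refine ⟨a.modify (es.getD m ' ') 0 (· + 1), ?_, ?_⟩
          · have hsp0 : specF es ps m = 0 := by
              simp only [specF, hG, Bool.false_eq_true, if_false]
              rw [if_pos (by omega)]
            have hms := map_set es ps m hm
            rw [hsp0] at hms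
            rw [hms]
          · intro c
            rw [PySem.Dict.getD_modify, yel_succ]
            by_cases hcc : c = es.getD m ' '
            · rw [if_pos hcc, hga, hcc]
              have : (es.getD m ' ' == es.getD m ' ' && !isG es ps m &&
                  decide (grnC es ps (es.getD m ' ') + bfr es ps (es.getD m ' ') m <
                    cntT ps (es.getD m ' '))) = true := by
                rw [hG, decide_eq_true hP]
                simp
              rw [this, if_pos rfl]
              push_cast
              ring
            · rw [if_neg hcc, hga]
              have : (es.getD m ' ' == c) = false :=
                beq_eq_false_iff_ne.mpr (fun h => hcc h.symm)
              rw [this]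
              simp
        · -- allowance exhausted: nothing happens at m
          have hcond : (apar.contains (es.getD m ' ') &&
              decide (a.getD (es.getD m ' ') 0 < apar.getD (es.getD m ' ') 0)) = false := by
            rw [hga, hget _ hmem]
            simp only [Bool.and_eq_false_iff, decide_eq_false_iff_not, Nat.cast_lt, not_lt]
            right
            omega
          rw [if_neg (show ¬ _ = true by rw [hcond]; decide)]
          have hsp : specF es ps m = if isG es ps m then 1 else -1 := by
            simp only [specF, hG, Bool.false_eq_true, if_false]
            rw [if_neg (by omega)]
          refine ⟨a, by rw [map_bump es ps m hsp], ?_⟩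
          intro c
          rw [hga, yel_succ]
          by_cases hcc : c = es.getD m ' '
          · rw [hcc]
            have : decide (grnC es ps (es.getD m ' ') + bfr es ps (es.getD m ' ') m <
                cntT ps (es.getD m ' ')) = false := decide_eq_false hP
            rw [this]
            simp
          · have : (es.getD m ' ' == c) = false :=
              beq_eq_false_iff_ne.mpr (fun h => hcc h.symm)
            rw [this]
            simp
      · -- letter absent from the target word
        have hcnt : cntT ps (es.getD m ' ') = 0 := by
          unfold cntT
          exact List.count_eq_zero.mpr hmem
        have hcond : (apar.contains (es.getD m ' ') &&
            decide (a.getD (es.getD m ' ') 0 < apar.getD (es.getD m ' ') 0)) = false := by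
          have : apar.contains (es.getD m ' ') = false := by
            rw [← Bool.not_eq_true, (hcon _)]
            exact hmem
          rw [this]
          rfl
        rw [if_neg (show ¬ _ = true by rw [hcond]; decide)]
        have hsp : specF es ps m = if isG es ps m then 1 else -1 := by
          simp only [specF, hG, Bool.false_eq_true, if_false]
          rw [if_neg (by omega)]
        refine ⟨a, by rw [map_bump es ps m hsp], ?_⟩
        intro c
        rw [hga, yel_succ]
        by_cases hcc : c = es.getD m ' '
        · rw [hcc]
          have : decide (grnC es ps (es.getD m ' ') + bfr es ps (es.getD m ' ') m <
              cntT ps (es.getD m ' ')) = false := decide_eq_false (by omega)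
          rw [this]
          simp
        · have : (es.getD m ' ' == c) = false :=
            beq_eq_false_iff_ne.mpr (fun h => hcc h.symm)
          rw [this]
          simp
theorem A_closed (entrada palabra : String)
    (_h : entrada.toList.length ≤ palabra.toList.length) :
    validar_palabra entrada palabra
      = (List.range entrada.toList.length).map (specF entrada.toList palabra.toList) := by
  simp only [validar_palabra, PySem.List.enumerate_eq_map_pyRange _ ' ', PySem.List.len,
    PySem.List.pyRange_zero_natCast, List.foldl_map, PySem.List.pyGetD_natCast,
    PySem.List.pyGet?_natCast, PySem.List.pySetD_natCast]
  set es := entrada.toList with hes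
  set ps := palabra.toList with hps
  have hsplit : (fun (x : List Int × PySem.Dict Char Int) (y : Nat) =>
      if ps[y]? = some (es.getD y ' ') then
        (x.1.set y 1, x.2.modify (es.getD y ' ') 0 (· + 1)) else x)
    = (fun x y => (if ps[y]? = some (es.getD y ' ') then x.1.set y 1 else x.1,
                   if ps[y]? = some (es.getD y ' ') then x.2.modify (es.getD y ' ') 0 (· + 1) else x.2)) := by
    funext x y
    split <;> rfl
  rw [hsplit]
  have h1 : List.foldl
      (fun (x : List Int × PySem.Dict Char Int) (y : Nat) =>
        (if ps[y]? = some (es.getD y ' ') then x.1.set y 1 else x.1,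
         if ps[y]? = some (es.getD y ' ') then x.2.modify (es.getD y ' ') 0 (· + 1) else x.2))
      (List.replicate es.length (-1),
        List.foldl (fun d letra => d.insert letra 0) PySem.Dict.empty (PySem.Set.ofList es))
      (List.range es.length)
    = (List.foldl (fun r y => if ps[y]? = some (es.getD y ' ') then r.set y 1 else r)
         (List.replicate es.length (-1)) (List.range es.length),
       List.foldl (fun d y => if ps[y]? = some (es.getD y ' ') then d.modify (es.getD y ' ') 0 (· + 1) else d)
         (List.foldl (fun d letra => d.insert letra 0) PySem.Dict.empty (PySem.Set.ofList es))
         (List.range es.length)) :=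
    PySem.List.foldl_prod_mk
      (fun (r : List Int) (y : Nat) => if ps[y]? = some (es.getD y ' ') then r.set y 1 else r)
      (fun (d : PySem.Dict Char Int) (y : Nat) =>
        if ps[y]? = some (es.getD y ' ') then d.modify (es.getD y ' ') 0 (· + 1) else d)
      _ _ _
  rw [h1, loop1_res es ps]
  obtain ⟨a, hfold, -⟩ := loop2_inv es ps
    ((PySem.Set.ofList ps).foldl
      (fun d letra => d.insert letra ((PySem.List.count ps letra : Nat) : Int)) PySem.Dict.empty)
    (List.foldl
      (fun d (j : Nat) => if ps[j]? = some (es.getD j ' ') then d.modify (es.getD j ' ') 0 (· + 1) else d)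
      ((PySem.Set.ofList es).foldl (fun d letra => d.insert letra 0) PySem.Dict.empty)
      (List.range es.length))
    (fun c => contains_apar ps c)
    (fun c hc => by rw [getD_apar]; simp [hc])
    (fun c => loop1_ana es ps c)
    es.length le_rfl
  rw [hfold]
  apply List.map_congr_left
  intro j hj
  simp only [List.mem_range] at hj
  rw [if_pos hj]
theorem B_closed (entrada palabra : String) :
    validar_palabra_alt entrada palabra
      = (List.range entrada.toList.length).map (specF entrada.toList palabra.toList) := by
  simp only [validar_palabra_alt, PySem.List.pyGetD_natCast, PySem.List.pyGet?_natCast,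
    PySem.List.count_eq]
  apply List.map_congr_left
  intro i hi
  simp only [List.mem_range] at hi
  unfold specF cntT grnC bfr
  simp only [Bool.decide_and, ← Bool.beq_eq_decide_eq]
  have hng : ∀ j : Nat, decide (palabra.toList[j]? ≠ some (entrada.toList.getD j ' '))
      = !isG entrada.toList palabra.toList j := by
    intro j
    simp [isG]
  have hg : ∀ j : Nat, (palabra.toList[j]? == some (entrada.toList.getD j ' '))
      = isG entrada.toList palabra.toList j := by
    intro j
    simp [isG, Bool.beq_eq_decide_eq]
  simp only [hng, hg]
  have houter : (palabra.toList[i]? = some (entrada.toList.getD i ' '))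
      ↔ (isG entrada.toList palabra.toList i = true) := by
    simp [isG]
  rw [if_congr houter rfl rfl]

-- ===== VERDICT (by name: the statement is the Claim_ definition above) =====
theorem validar_palabra_spec : Claim_equal_validar_palabra := by
  intro entrada palabra _ hpre
  unfold Spec_validar_palabra
  rw [A_closed entrada palabra hpre, B_closed]
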